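-- pv_equiv track=rewrite | github.com/yunnie05/Introduction-to-Programming | Week 9/ip093.py | dicti
-- ===== SOURCE A (Python) =====
-- def to_binary(var):
--     ans= []
--     if isinstance(var,int):
--        while var!=0:
--            if var!=0:
--                 ans.insert(0,var % 2)
--                 var= var//2
--     elif isinstance(var,str):
--         for i in var:
--             if i == ".":
--                 ans.append(0)
--             else:
--                 ans.append(1)
--     return ans
--
-- def to_string(var):
--     ans= ""
--     for i in var:
--         ans+= str(i)
--     return ans
--
-- def keys(var):
--     ans=[]
--     x= 0
--     for _ in range(len(var)):
--         key= to_string(to_binary(x))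
--         if len(key) < 3:
--             aux= 3 - len(key)
--             key= "0"*aux + key
--         ans.append(key)
--         x+=1
--     return ans
--
-- def dicti(var: list): #gera as chaves para cada string 000 010...
--     aux= -1
--     ans= {}
--     x= 0
--     ks= keys(var)
--     ks.reverse()
--     for i in ks:
--         ans[i]= var[x]
--         x+=1
--     return ans
-- ===== SOURCE B (Python) =====
-- def _inc(key):
--     # binary successor of a 0/1 string: flip trailing 1s, set the first 0 from
--     # the right; grow by one digit if the string is all 1s
--     bits = list(key)
--     i = len(bits) - 1
--     while i >= 0 and bits[i] == '1':
--         bits[i] = '0'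
--         i -= 1
--     if i < 0:
--         return '1' + ''.join(bits)
--     bits[i] = '1'
--     return ''.join(bits)
--
-- def dicti(var: list):
--     # count in binary with a string counter (no division, no format): walk the
--     # reversed list pairing each value with the current counter, then insert
--     # the pairs in reverse to reproduce the original dict's insertion order
--     pairs = []
--     key = "000"
--     for v in reversed(var):
--         pairs.append((key, v))
--         key = _inc(key)
--     return dict(reversed(pairs))
-- ===== Notes on version B (the rewrite author's own statement) =====
-- stated objective: faster
-- what changed: B replaces A's per-index binary conversion (divide-by-2 loop, digit-to-string pass, padding, key-list reverse and second assignment loop) with a single walk over the reversed list that counts in binary: it maintains a string counter starting at "000" and advances it by a carry-propagating string successor (_inc, amortized O(1) per step), pairing each value with the counter and inserting the pairs in reverse.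
import Mathlib
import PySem

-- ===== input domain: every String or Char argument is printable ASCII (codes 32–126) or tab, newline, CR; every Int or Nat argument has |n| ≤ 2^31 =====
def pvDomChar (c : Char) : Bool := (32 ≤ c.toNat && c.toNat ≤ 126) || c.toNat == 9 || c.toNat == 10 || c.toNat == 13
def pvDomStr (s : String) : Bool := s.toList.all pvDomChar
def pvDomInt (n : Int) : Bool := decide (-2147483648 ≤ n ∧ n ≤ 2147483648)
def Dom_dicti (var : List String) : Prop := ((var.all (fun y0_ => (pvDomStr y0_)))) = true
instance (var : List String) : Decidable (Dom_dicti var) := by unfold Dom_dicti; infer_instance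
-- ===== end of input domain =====

-- B counts in binary with a carry-propagating string-successor counter over the reversed
-- list, replacing A's per-index divide-by-2 conversion, padding, reverse and second pass.

-- ===== PORT A =====
-- port of to_binary (the int branch: dicti only ever calls it on the nonneg loop counter,
-- where Python's % and // agree with Nat's % and /; on negatives the Python loop never ends)
def toBinaryA (v : Nat) (ans : List Int) : List Int :=
  if v = 0 then ans
  else toBinaryA (v / 2) (((v % 2 : Nat) : Int) :: ans)
  termination_by v
  decreasing_by omega

-- port of to_string
def toStringA (l : List Int) : String :=
  l.foldl (fun s i => s ++ PySem.Int.toStr i) ""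

-- the key built for counter x inside keys' loop ("0"*aux is String.ofList (replicate aux '0');
-- the local variable key is inlined)
def keyA (x : Nat) : String :=
  if PySem.Str.len (toStringA (toBinaryA x [])) < 3 then
    String.ofList (List.replicate (3 - PySem.Str.len (toStringA (toBinaryA x []))).toNat '0')
      ++ toStringA (toBinaryA x [])
  else toStringA (toBinaryA x [])

-- port of keys
def keysA (var : List String) : List String :=
  ((List.range var.length).foldl
    (fun (st : List String × Nat) _ => (st.1 ++ [keyA st.2], st.2 + 1))
    ([], 0)).1

def dicti (var : List String) : List (String × String) :=
  let ks := (keysA var).reverse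
  ((ks.foldl
    (fun (st : PySem.Dict String String × Int) i =>
      (st.1.insert i (PySem.List.pyGetD var st.2 ""), st.2 + 1))
    (PySem.Dict.empty, 0)).1).items

-- ===== PORT B =====
-- port of _inc's right-to-left carry scan: scan the reversed digit list, flipping
-- leading (= trailing in the string) '1's to '0' until a '0' is set to '1';
-- an empty remainder means the string was all 1s and a new '1' digit appears
def incRev : List Char → List Char
  | [] => ['1']
  | c :: rest => if c = '1' then '0' :: incRev rest else '1' :: rest

def incS (key : String) : String := String.ofList ((incRev key.toList.reverse).reverse)

def dicti_alt (var : List String) : List (String × String) :=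
  let pairs := (var.reverse.foldl
    (fun (st : List (String × String) × String) v => (st.1 ++ [(st.2, v)], incS st.2))
    ([], "000")).1
  (pairs.reverse.foldl
    (fun (d : PySem.Dict String String) p => d.insert p.1 p.2)
    PySem.Dict.empty).items

-- ===== PRECONDITION & SPEC =====
def Spec_dicti (var : List String) (out : List (String × String)) : Prop := out = dicti_alt var
instance (var : List String) (out : List (String × String)) : Decidable (Spec_dicti var out) := by unfold Spec_dicti; infer_instance

-- ===== CLAIM (what is proved, stated in full; the proofs are below) =====
def Claim_equal_dicti : Prop := ∀ (var : List String), Dom_dicti var → Spec_dicti var (dicti var)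

-- ===== LEMMAS AND PROOFS =====

-- msb-first binary digits of a natural number (empty for 0)
def bitsN (x : Nat) : List Nat :=
  if x = 0 then [] else bitsN (x / 2) ++ [x % 2]
  termination_by x
  decreasing_by omega

theorem bitsN_lt_two (x : Nat) : ∀ b ∈ bitsN x, b < 2 := by
  induction x using Nat.strong_induction_on with
  | _ x ih =>
    rw [bitsN]
    split
    · simp
    · intro b hb
      rcases List.mem_append.mp hb with h | h
      · exact ih (x / 2) (by omega) b h
      · simp at h; omega

theorem toBinaryA_eq (x : Nat) : ∀ ans, toBinaryA x ans = (bitsN x).map (fun b : Nat => (b : Int)) ++ ans := by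
  induction x using Nat.strong_induction_on with
  | _ x ih =>
    intro ans
    rw [toBinaryA, bitsN]
    split
    · simp
    · rw [ih (x / 2) (by omega)]
      simp

theorem toStringA_toList (l : List Int) : ∀ s : String,
    ((l.foldl (fun s i => s ++ PySem.Int.toStr i) s)).toList
      = s.toList ++ l.flatMap PySem.Int.toChars := by
  induction l with
  | nil => simp
  | cons a l ih =>
    intro s
    simp [List.foldl_cons, ih, String.toList_append, PySem.Int.toList_toStr]

theorem toChars_bit (b : Nat) (hb : b < 2) : PySem.Int.toChars (b : Int) = [Nat.digitChar b] := by
  interval_cases b <;> decide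

theorem flatMap_toChars_bits (l : List Nat) (hl : ∀ b ∈ l, b < 2) :
    ((l.map (fun b : Nat => (b : Int))).flatMap PySem.Int.toChars) = l.map Nat.digitChar := by
  induction l with
  | nil => simp
  | cons a l ih =>
    simp only [List.map_cons, List.flatMap_cons, toChars_bit a (hl a (by simp))]
    rw [ih (fun b hb => hl b (by simp [hb]))]
    rfl

theorem key_chars (x : Nat) :
    (toStringA (toBinaryA x [])).toList = (bitsN x).map Nat.digitChar := by
  rw [toStringA, toStringA_toList, toBinaryA_eq]
  rw [List.append_nil, flatMap_toChars_bits (bitsN x) (bitsN_lt_two x)]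
  simp

-- the padded key as a char list
def pk (j : Nat) : List Char :=
  List.replicate (3 - (bitsN j).length) '0' ++ (bitsN j).map Nat.digitChar

theorem keyA_toList (x : Nat) : (keyA x).toList = pk x := by
  have hlen : PySem.Str.len (toStringA (toBinaryA x []))
      = (((bitsN x).map Nat.digitChar).length : Int) := by
    rw [PySem.Str.len_eq, key_chars]
  rw [keyA, pk]
  by_cases h3 : ((bitsN x).map Nat.digitChar).length < 3
  · rw [if_pos (by rw [hlen]; exact_mod_cast h3)]
    rw [String.toList_append, String.toList_ofList, key_chars, hlen]
    congr 2
    simp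
  · rw [if_neg (by rw [hlen]; exact_mod_cast h3), key_chars]
    have : 3 - (bitsN x).length = 0 := by simp at h3; omega
    rw [this]
    simp

-- lsb-first digit chars of j
def lsb (j : Nat) : List Char := ((bitsN j).map Nat.digitChar).reverse

theorem lsb_zero : lsb 0 = [] := by rw [lsb, bitsN]; simp

theorem lsb_cons (j : Nat) (hj : j ≠ 0) :
    lsb j = Nat.digitChar (j % 2) :: lsb (j / 2) := by
  rw [lsb, bitsN, if_neg hj]
  simp [lsb]

-- the counter-successor computes binary successor on lsb-first digits
theorem incRev_lsb (j : Nat) : incRev (lsb j) = lsb (j + 1) := by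
  induction j using Nat.strong_induction_on with
  | _ j ih =>
    by_cases h0 : j = 0
    · subst h0
      rw [lsb_zero, lsb_cons 1 (by omega), lsb_zero]
      decide
    · rw [lsb_cons j h0, incRev]
      by_cases he : j % 2 = 0
      · rw [he, show Nat.digitChar 0 = '0' from by decide, if_neg (by decide)]
        rw [lsb_cons (j + 1) (by omega), show (j + 1) % 2 = 1 from by omega,
          show (j + 1) / 2 = j / 2 from by omega, show Nat.digitChar 1 = '1' from by decide]
      · rw [show j % 2 = 1 from by omega, show Nat.digitChar 1 = '1' from by decide,
          if_pos rfl, ih (j / 2) (by omega)]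
        rw [lsb_cons (j + 1) (by omega), show (j + 1) % 2 = 0 from by omega,
          show (j + 1) / 2 = j / 2 + 1 from by omega, show Nat.digitChar 0 = '0' from by decide]

theorem bitsN_lt (j : Nat) : j < 2 ^ (bitsN j).length := by
  induction j using Nat.strong_induction_on with
  | _ j ih =>
    rw [bitsN]
    split
    · simp only [List.length_nil, pow_zero]; omega
    · have := ih (j / 2) (by omega)
      simp only [List.length_append, List.length_cons, List.length_nil]
      rw [pow_succ]
      omega

theorem len_ge_three (j : Nat) (hj : 4 ≤ j) : 3 ≤ (bitsN j).length := by
  by_contra h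
  have h2 := bitsN_lt j
  have h3 : (bitsN j).length ≤ 2 := by omega
  have h4 : (2 : Nat) ^ (bitsN j).length ≤ 2 ^ 2 := Nat.pow_le_pow_right (by omega) h3
  norm_num at h4
  omega

theorem bitsN_0 : bitsN 0 = [] := by rw [bitsN]; simp
theorem bitsN_1 : bitsN 1 = [1] := by rw [bitsN]; norm_num [bitsN_0]
theorem bitsN_2 : bitsN 2 = [1, 0] := by rw [bitsN]; norm_num [bitsN_1]
theorem bitsN_3 : bitsN 3 = [1, 1] := by rw [bitsN]; norm_num [bitsN_1]
theorem bitsN_4 : bitsN 4 = [1, 0, 0] := by rw [bitsN]; norm_num [bitsN_2]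

theorem pk_0 : pk 0 = ['0', '0', '0'] := by rw [pk, bitsN_0]; decide
theorem pk_1 : pk 1 = ['0', '0', '1'] := by rw [pk, bitsN_1]; decide
theorem pk_2 : pk 2 = ['0', '1', '0'] := by rw [pk, bitsN_2]; decide
theorem pk_3 : pk 3 = ['0', '1', '1'] := by rw [pk, bitsN_3]; decide
theorem pk_4 : pk 4 = ['1', '0', '0'] := by rw [pk, bitsN_4]; decide

-- the string counter steps through the padded keys
theorem incC_pk (j : Nat) : (incRev (pk j).reverse).reverse = pk (j + 1) := by
  by_cases h4 : 4 ≤ j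
  · have hp : pk j = (bitsN j).map Nat.digitChar := by
      rw [pk, show 3 - (bitsN j).length = 0 from by have := len_ge_three j h4; omega]
      simp
    have hp1 : pk (j + 1) = (bitsN (j + 1)).map Nat.digitChar := by
      rw [pk, show 3 - (bitsN (j + 1)).length = 0 from by
        have := len_ge_three (j + 1) (by omega); omega]
      simp
    rw [hp, hp1, ← lsb, incRev_lsb, lsb, List.reverse_reverse]
  · interval_cases j
    · rw [pk_0, pk_1]; decide
    · rw [pk_1, pk_2]; decide
    · rw [pk_2, pk_3]; decide
    · rw [pk_3, pk_4]; decide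

-- B's pair-building loop, characterized
def bp (l : List String) (j : Nat) : List (String × String) :=
  match l with
  | [] => []
  | v :: t => (String.ofList (pk j), v) :: bp t (j + 1)

theorem incS_pk (j : Nat) : incS (String.ofList (pk j)) = String.ofList (pk (j + 1)) := by
  rw [incS, String.toList_ofList, incC_pk]

theorem foldB_eq (l : List String) : ∀ (acc : List (String × String)) (j : Nat),
    (l.foldl
      (fun (st : List (String × String) × String) v => (st.1 ++ [(st.2, v)], incS st.2))
      (acc, String.ofList (pk j))).1 = acc ++ bp l j := by
  induction l with
  | nil => intro acc j; simp [bp]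
  | cons v t ih =>
    intro acc j
    rw [List.foldl_cons, bp]
    simp only [incS_pk, ih]
    simp

theorem length_bp (l : List String) : ∀ j, (bp l j).length = l.length := by
  induction l with
  | nil => intro j; rfl
  | cons v t ih => intro j; simp [bp, ih]

theorem getElem_bp (l : List String) : ∀ (j k : Nat) (hk : k < l.length),
    (bp l j)[k]'(by rw [length_bp]; exact hk) = (String.ofList (pk (j + k)), l[k]) := by
  induction l with
  | nil => intro j k hk; simp at hk
  | cons v t ih =>
    intro j k hk
    cases k with
    | zero => simp [bp]
    | succ k =>
      have := ih (j + 1) k (by simpa using hk)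
      simp only [bp, List.getElem_cons_succ, this, show j + 1 + k = j + (k + 1) from by omega]

-- the pairs A's final loop inserts, starting at counter x
def pairsA (var : List String) : List String → Int → List (String × String)
  | [], _ => []
  | k :: l, x => (k, PySem.List.pyGetD var x "") :: pairsA var l (x + 1)

theorem foldA_eq (var : List String) (l : List String) : ∀ (d : PySem.Dict String String) (x : Int),
    (l.foldl
      (fun (st : PySem.Dict String String × Int) i =>
        (st.1.insert i (PySem.List.pyGetD var st.2 ""), st.2 + 1)) (d, x)).1
      = (pairsA var l x).foldl (fun d p => d.insert p.1 p.2) d := by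
  induction l with
  | nil => intro d x; rfl
  | cons k l ih => intro d x; simp [pairsA, List.foldl_cons, ih]

theorem length_pairsA (var : List String) (l : List String) : ∀ x, (pairsA var l x).length = l.length := by
  induction l with
  | nil => intro x; rfl
  | cons k l ih => intro x; simp [pairsA, ih]

theorem getElem_pairsA (var : List String) (l : List String) : ∀ (x : Int) (j : Nat) (hj : j < l.length),
    (pairsA var l x)[j]'(by rw [length_pairsA]; exact hj)
      = (l[j], PySem.List.pyGetD var (x + j) "") := by
  induction l with
  | nil => intro x j hj; simp at hj
  | cons k l ih =>
    intro x j hj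
    cases j with
    | zero => simp [pairsA]
    | succ j =>
      have := ih (x + 1) j (by simpa using hj)
      simp only [pairsA, List.getElem_cons_succ, this]
      congr 2
      push_cast
      ring

theorem keysA_go (k : Nat) : ∀ (ans : List String) (x : Nat),
    (List.range k).foldl
        (fun (st : List String × Nat) _ => (st.1 ++ [keyA st.2], st.2 + 1)) (ans, x)
      = (ans ++ (List.range k).map (fun j => keyA (x + j)), x + k) := by
  induction k with
  | zero => intro ans x; simp
  | succ k ih =>
    intro ans x
    rw [List.range_succ, List.foldl_append, ih]
    simp [List.map_append, Nat.add_assoc]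

theorem keysA_eq (var : List String) :
    keysA var = (List.range var.length).map keyA := by
  rw [keysA, keysA_go]
  simp

theorem dicti_eq_alt (var : List String) : dicti var = dicti_alt var := by
  rw [dicti, dicti_alt]
  rw [foldA_eq]
  rw [show ("000" : String) = String.ofList (pk 0) from by rw [pk_0], foldB_eq]
  have hlist : pairsA var ((keysA var).reverse) 0 = (bp var.reverse 0).reverse := by
    apply List.ext_getElem
    · rw [length_pairsA, List.length_reverse, keysA_eq, List.length_map, List.length_range,
        List.length_reverse, length_bp, List.length_reverse]
    · intro j h1 h2
      have hn : j < var.length := by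
        simpa [length_pairsA, keysA_eq] using h1
      have hbl : (bp var.reverse 0).length = var.length := by
        rw [length_bp, List.length_reverse]
      rw [getElem_pairsA var _ 0 j (by simpa [keysA_eq] using hn)]
      have hrev : ((keysA var).reverse)[j]'(by simpa [keysA_eq] using hn)
          = keyA (var.length - 1 - j) := by
        rw [List.getElem_of_eq (congrArg List.reverse (keysA_eq var))]
        rw [List.getElem_reverse]
        simp
      rw [hrev]
      rw [List.getElem_reverse]
      rw [getElem_bp var.reverse 0 ((bp var.reverse 0).length - 1 - j)
        (by rw [List.length_reverse]; omega)]
      have hidx : (PySem.List.pyGetD var ((0 : Int) + (j : Nat)) "") = var[j] := by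
        have h00 : ((0 : Int) + (j : Nat)) = ((j : Nat) : Int) := by omega
        rw [h00, PySem.List.pyGetD_natCast]
        simp [List.getD, hn]
      rw [hidx]
      have hA : keyA (var.length - 1 - j) = String.ofList (pk (var.length - 1 - j)) := by
        apply String.toList_inj.mp
        rw [keyA_toList, String.toList_ofList]
      rw [hA]
      simp only [hbl]
      rw [List.getElem_reverse]
      simp only [show var.length - 1 - (var.length - 1 - j) = j from by omega, Nat.zero_add]
  rw [hlist]
  simp

-- ===== VERDICT (by name: the statement is the Claim_ definition above) =====
theorem dicti_spec : Claim_equal_dicti := by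
  intro var _
  unfold Spec_dicti
  exact dicti_eq_alt var
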